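-- pv_equiv track=rewrite | github.com/w8floosh/quantum-fsm | tools.py | pb_decompose
-- ===== SOURCE A (Python) =====
-- def pb_decompose(w: str):
--     d = len(w)
--     _d = get_reverse_bitstr(d)  # reverse bitstring
--     S = []
--     for i, bit in enumerate(_d):
--         if int(bit):
--             S.append(i)
--
--     decomposition = []
--     for i in S:
--         lsum = bin_prefix_sum(_d, i - 1)
--         rsum = bin_prefix_sum(_d, i) - 1
--         decomposition.append(w[lsum:rsum])
--
--     return decomposition
--
-- def bin_prefix_sum(x: str, end: int):
--     sum = 0
--     for i, bit in enumerate(x):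
--         if int(bit):
--             sum += 2**i
--         if i == end:
--             break
--     return sum
--
-- def get_reverse_bitstr(x: int):
--     return (bin(x)[2:])[::-1]  # reverse bitstring
-- ===== SOURCE B (Python) =====
-- def pb_decompose(w: str):
--     decomposition = []
--     acc = 0
--     for i, bit in enumerate(bin(len(w))[2:][::-1]):
--         if bit == '1':
--             decomposition.append(w[acc: acc + (1 << i) - 1])
--             acc += 1 << i
--     return decomposition
-- ===== Notes on version B (the rewrite author's own statement) =====
-- stated objective: simpler
-- what changed: Both helper functions are dropped: instead of recomputing a binary prefix sum over the reversed bitstring for each set bit, B makes a single pass over the bits keeping a running offset accumulator and emits each slice directly.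
import Mathlib
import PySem

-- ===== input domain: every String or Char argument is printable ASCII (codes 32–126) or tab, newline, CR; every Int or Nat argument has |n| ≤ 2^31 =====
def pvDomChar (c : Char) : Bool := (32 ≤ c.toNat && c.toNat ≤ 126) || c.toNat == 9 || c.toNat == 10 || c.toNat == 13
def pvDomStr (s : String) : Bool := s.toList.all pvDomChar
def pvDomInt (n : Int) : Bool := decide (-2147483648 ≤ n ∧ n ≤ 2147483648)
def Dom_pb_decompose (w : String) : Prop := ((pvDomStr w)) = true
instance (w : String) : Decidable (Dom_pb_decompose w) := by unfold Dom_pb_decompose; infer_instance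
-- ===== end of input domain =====

-- B replaces A's per-set-bit recomputation of binary prefix sums by one single pass
-- over the reversed bitstring with a running offset accumulator (objective: simpler).

-- ===== PORT A =====
-- bin_prefix_sum: enumerate loop with accumulator, early break when i == end
def pvBinPrefixSumAux (e : Int) : List Char → Nat → Int → Int
  | [], _, s => s
  | b :: rest, i, s =>
    let s' := if b = '1' then s + 2 ^ i else s
    if (i : Int) = e then s' else pvBinPrefixSumAux e rest (i + 1) s'

def pvBinPrefixSum (x : List Char) (e : Int) : Int := pvBinPrefixSumAux e x 0 0

-- get_reverse_bitstr: (bin(x)[2:])[::-1]; step -1 ≠ 0 so slice? is `some` and .getD [] never defaults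
def pvGetReverseBitstr (x : Int) : List Char :=
  (PySem.List.slice? (PySem.List.slice (PySem.Int.pyBin x).toList (some 2) none) none none (-1)).getD []

def pb_decompose (w : String) : List String :=
  let d : Int := PySem.Str.len w
  let _d : List Char := pvGetReverseBitstr d
  let S : List Int :=
    (PySem.List.enumerate _d).foldl (fun S p => if p.2 = '1' then S ++ [p.1] else S) []
  S.foldl (fun dec i =>
    let lsum := pvBinPrefixSum _d (i - 1)
    let rsum := pvBinPrefixSum _d i - 1
    dec ++ [PySem.Str.slice w (some lsum) (some rsum)]) []

-- ===== PORT B =====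
-- single pass over the reversed bitstring with a running offset acc
def pvAltGo (w : String) : List Char → Nat → Int → List String
  | [], _, _ => []
  | b :: rest, i, acc =>
    if b = '1' then
      PySem.Str.slice w (some acc) (some (acc + 2 ^ i - 1)) :: pvAltGo w rest (i + 1) (acc + 2 ^ i)
    else pvAltGo w rest (i + 1) acc

def pb_decompose_alt (w : String) : List String :=
  pvAltGo w ((PySem.Int.toBin (PySem.Str.len w)).toList.reverse) 0 0

-- ===== PRECONDITION & SPEC =====
def Spec_pb_decompose (w : String) (out : List String) : Prop := out = pb_decompose_alt w
instance (w : String) (out : List String) : Decidable (Spec_pb_decompose w out) := by unfold Spec_pb_decompose; infer_instance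

-- ===== CLAIM (what is proved, stated in full; the proofs are below) =====
def Claim_equal_pb_decompose : Prop := ∀ (w : String), Dom_pb_decompose w → Spec_pb_decompose w (pb_decompose w)

-- ===== LEMMAS AND PROOFS =====
def pvWsum : List Char → Nat → Int
  | [], _ => 0
  | b :: rest, i => (if b = '1' then 2 ^ i else 0) + pvWsum rest (i + 1)

theorem pvWsum_nonneg (bs : List Char) (i : Nat) : 0 ≤ pvWsum bs i := by
  induction bs generalizing i with
  | nil => simp [pvWsum]
  | cons b rest ih =>
    have := ih (i + 1)
    have h2 : (0:Int) ≤ 2 ^ i := by positivity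
    simp only [pvWsum]
    split <;> omega

theorem pvWsum_append (xs ys : List Char) (i : Nat) :
    pvWsum (xs ++ ys) i = pvWsum xs i + pvWsum ys (i + xs.length) := by
  induction xs generalizing i with
  | nil => simp [pvWsum]
  | cons b rest ih =>
    simp only [List.cons_append, pvWsum, ih (i + 1), List.length_cons]
    ring_nf

theorem pvBinPrefixSumAux_char (bs : List Char) (p : Nat) (e s : Int) :
    pvBinPrefixSumAux e bs p s =
      s + (if e < (p : Int) then pvWsum bs p
           else pvWsum (bs.take ((e - p).toNat + 1)) p) := by
  induction bs generalizing p s with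
  | nil => simp [pvBinPrefixSumAux, pvWsum]
  | cons b rest ih =>
    simp only [pvBinPrefixSumAux]
    by_cases hbe : (p : Int) = e
    · rw [if_pos hbe, ← hbe, if_neg (lt_irrefl _), sub_self]
      norm_num [pvWsum]
      split <;> ring
    · rw [if_neg hbe, ih]
      by_cases hlt : e < (p : Int)
      · rw [if_pos (show e < ((p + 1 : Nat) : Int) by push_cast; omega), if_pos hlt]
        simp only [pvWsum]
        split <;> ring
      · rw [if_neg (show ¬ e < ((p + 1 : Nat) : Int) by push_cast; omega), if_neg hlt]
        rw [show (e - (p:Int)).toNat + 1 = ((e - ((p + 1 : Nat) : Int)).toNat + 1) + 1 by push_cast; omega]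
        simp only [List.take_succ_cons, pvWsum, Nat.add_comm p 1]
        split <;> ring

theorem pvBinPrefixSum_neg (bs : List Char) (e : Int) (he : e < 0) :
    pvBinPrefixSum bs e = pvWsum bs 0 := by
  unfold pvBinPrefixSum
  rw [pvBinPrefixSumAux_char, if_pos (by exact_mod_cast he)]
  ring

theorem pvBinPrefixSum_nat (bs : List Char) (k : Nat) :
    pvBinPrefixSum bs (k : Int) = pvWsum (bs.take (k + 1)) 0 := by
  unfold pvBinPrefixSum
  rw [pvBinPrefixSumAux_char, if_neg (by push_cast; omega)]
  norm_num

theorem pvSlice_zero (w : String) (a : Int) (ha : 0 ≤ a) :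
    PySem.Str.slice w (some a) (some 0) = PySem.Str.slice w (some 0) (some 0) := by
  rw [← String.toList_inj]
  simp only [PySem.Str.toList_slice, PySem.Chars.slice_eq_listSlice]
  rw [PySem.List.slice_toNat _ ha (by norm_num), PySem.List.slice_toNat _ le_rfl (by norm_num)]
  simp

theorem pvHead_eq (w : String) (pre rest : List Char) :
    PySem.Str.slice w (some (pvBinPrefixSum (pre ++ '1' :: rest) ((pre.length : Int) - 1)))
      (some (pvBinPrefixSum (pre ++ '1' :: rest) (pre.length : Int) - 1))
    = PySem.Str.slice w (some (pvWsum pre 0)) (some (pvWsum pre 0 + 2 ^ pre.length - 1)) := by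
  have h2 : pvBinPrefixSum (pre ++ '1' :: rest) ((pre.length : Int))
      = pvWsum pre 0 + 2 ^ pre.length := by
    rw [pvBinPrefixSum_nat]
    rw [show pre ++ '1' :: rest = (pre ++ ['1']) ++ rest by simp,
        show pre.length + 1 = (pre ++ ['1']).length by simp, List.take_left]
    rw [pvWsum_append]
    norm_num [pvWsum]
  rw [h2]
  rcases pre with _ | ⟨q, qs⟩
  · rw [show ((List.length ([] : List Char) : Int) - 1) = (-1 : Int) by simp,
        pvBinPrefixSum_neg _ _ (by norm_num)]
    norm_num [pvWsum]
    exact pvSlice_zero w _ (by have := pvWsum_nonneg rest 1; omega)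
  · have h1 : pvBinPrefixSum ((q :: qs) ++ '1' :: rest) (((q :: qs).length : Int) - 1)
        = pvWsum (q :: qs) 0 := by
      rw [show (((q :: qs).length : Int) - 1) = ((qs.length : Nat) : Int) by simp,
          pvBinPrefixSum_nat, show qs.length + 1 = (q :: qs).length by simp, List.take_left]
    rw [h1]

theorem pvMain (w : String) (t : List Char) : ∀ (pre : List Char),
    pvAltGo w t pre.length (pvWsum pre 0) =
      ((PySem.List.enumerate t (pre.length : Int)).filter (fun p => decide (p.2 = '1'))).map
        (fun p => PySem.Str.slice w (some (pvBinPrefixSum (pre ++ t) (p.1 - 1)))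
                                    (some (pvBinPrefixSum (pre ++ t) p.1 - 1))) := by
  induction t with
  | nil => intro pre; simp [pvAltGo, PySem.List.enumerate_nil]
  | cons c rest ih =>
    intro pre
    have hsplit : pre ++ c :: rest = (pre ++ [c]) ++ rest := by simp
    have hlen : (pre ++ [c]).length = pre.length + 1 := by simp
    have hws : pvWsum (pre ++ [c]) 0 = pvWsum pre 0 + (if c = '1' then 2 ^ pre.length else 0) := by
      rw [pvWsum_append]
      simp [pvWsum]
    have ih' := ih (pre ++ [c])
    rw [hlen, hws] at ih'
    rw [PySem.List.enumerate_cons]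
    by_cases hc : c = '1'
    · subst hc
      simp only [pvAltGo, List.filter_cons]
      rw [if_pos trivial, if_pos (by norm_num), List.map_cons]
      congr 1
      · exact (pvHead_eq w pre rest).symm
      · rw [if_pos rfl] at hws
        rw [hsplit, ← hws, ← hlen,
            show (pre.length : Int) + 1 = ((pre ++ ['1']).length : Int) by rw [hlen]; push_cast; ring]
        exact ih (pre ++ ['1'])
    · simp only [pvAltGo, List.filter_cons]
      rw [if_neg hc, if_neg (by simp [hc])]
      rw [if_neg hc, add_zero] at hws
      rw [hsplit, ← hws, ← hlen,
          show (pre.length : Int) + 1 = ((pre ++ [c]).length : Int) by rw [hlen]; push_cast; ring]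
      exact ih (pre ++ [c])

theorem pvFoldS (l : List (Int × Char)) : ∀ acc : List Int,
    l.foldl (fun S p => if p.2 = '1' then S ++ [p.1] else S) acc
      = acc ++ (l.filter (fun p => decide (p.2 = '1'))).map (·.1) := by
  induction l with
  | nil => intro acc; simp
  | cons p rest ih =>
    intro acc
    simp only [List.foldl_cons, List.filter_cons]
    by_cases hp : p.2 = '1'
    · rw [if_pos hp, if_pos (by simp [hp]), ih]
      simp
    · rw [if_neg hp, if_neg (by simp [hp]), ih]

theorem pvBitstr_eq (n : Int) (hn : 0 ≤ n) :
    pvGetReverseBitstr n = (PySem.Int.toBin n).toList.reverse := by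
  unfold pvGetReverseBitstr
  rw [PySem.List.slice?_none_none_neg_one]
  simp only [Option.getD_some]
  rw [PySem.List.slice_from _ (by norm_num : (0:Int) ≤ 2)]
  rw [PySem.Int.toList_pyBin, PySem.Int.toList_toBin]
  unfold PySem.Int.toBinChars0b PySem.Int.toBinChars
  rw [if_neg (by omega), if_neg (by omega)]
  rfl

theorem pb_decompose_eq_alt (w : String) : pb_decompose w = pb_decompose_alt w := by
  have hd : (0:Int) ≤ PySem.Str.len w := by
    simp [PySem.Str.len_eq]
  simp only [pb_decompose, pb_decompose_alt]
  rw [pvBitstr_eq _ hd, pvFoldS, List.nil_append,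
      PySem.List.foldl_append_singleton_eq_map
        (fun i => PySem.Str.slice w
          (some (pvBinPrefixSum ((PySem.Int.toBin (PySem.Str.len w)).toList.reverse) (i - 1)))
          (some (pvBinPrefixSum ((PySem.Int.toBin (PySem.Str.len w)).toList.reverse) i - 1))) _ [],
      List.nil_append, List.map_map]
  have h := pvMain w ((PySem.Int.toBin (PySem.Str.len w)).toList.reverse) []
  simp only [List.length_nil, Nat.cast_zero, List.nil_append, pvWsum] at h
  rw [h, Function.comp_def]

-- ===== VERDICT (by name: the statement is the Claim_ definition above) =====
theorem pb_decompose_spec : Claim_equal_pb_decompose := by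
  intro w _
  exact pb_decompose_eq_alt w
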